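-- pv_equiv track=rewrite | github.com/izoq78/1-Day-1-Problem | 프로그래머스/0/181851. 전국 대회 선발 고사/전국 대회 선발 고사.py | solution
-- ===== SOURCE A (Python) =====
-- def solution(rank, attendance):
--     dic = dict(zip(rank,attendance))
--     lst = sorted(dic.items())
--     n1,n2,n3 = [i[0] for i in lst if i[1] == True][:3]
--     dic = list(dic)
--
--     a = dic.index(n1)
--     b = dic.index(n2)
--     c = dic.index(n3)
--
--     return 10000*a + 100*b + c
-- ===== SOURCE B (Python) =====
-- def solution(rank, attendance):
--     # one pass over the deduplicated entries keeping the three smallest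
--     # attending ranks (with their positions) -- no full sort, no .index scans
--     d = {}
--     for r, att in zip(rank, attendance):
--         d[r] = att
--     m1 = m2 = m3 = None
--     for i, (r, att) in enumerate(d.items()):
--         if att:
--             if m1 is None or r < m1[0]:
--                 m1, m2, m3 = (r, i), m1, m2
--             elif m2 is None or r < m2[0]:
--                 m2, m3 = (r, i), m2
--             elif m3 is None or r < m3[0]:
--                 m3 = (r, i)
--     return 10000 * m1[1] + 100 * m2[1] + m3[1]
-- ===== Notes on version B (the rewrite author's own statement) =====
-- stated objective: alternative
-- what changed: Replaces A's full sort of the dict items followed by three backward list.index scans with a single pass over the deduplicated entries that maintains the three smallest attending ranks together with their positions.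
import Mathlib
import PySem

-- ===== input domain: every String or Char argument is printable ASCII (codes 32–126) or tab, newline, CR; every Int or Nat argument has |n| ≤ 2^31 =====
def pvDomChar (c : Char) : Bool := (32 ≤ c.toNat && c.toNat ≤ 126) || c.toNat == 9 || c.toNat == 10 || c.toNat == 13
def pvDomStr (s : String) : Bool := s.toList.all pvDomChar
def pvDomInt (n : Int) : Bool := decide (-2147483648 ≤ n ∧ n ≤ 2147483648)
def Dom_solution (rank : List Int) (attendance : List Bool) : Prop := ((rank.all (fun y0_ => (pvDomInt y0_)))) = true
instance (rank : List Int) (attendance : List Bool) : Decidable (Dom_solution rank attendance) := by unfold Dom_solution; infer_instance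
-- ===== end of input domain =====

-- B replaces A's full sort of the dict items plus three backward .index scans by a
-- single pass over the deduplicated entries that keeps the three smallest attending
-- ranks together with their positions.

-- ===== PORT A =====
def solution (rank : List Int) (attendance : List Bool) : Int :=
  let dic := (rank.zip attendance).foldl (fun d p => d.insert p.1 p.2) PySem.Dict.empty
  let lst := PySem.List.sorted2 dic.items Prod.fst Prod.snd
  let picked := ((lst.filter (fun i => i.2 == true)).map (fun i => i.1)).take 3
  match picked with
  | [n1, n2, n3] =>
    let keys := dic.keys
    let a : Int := ((PySem.List.index? keys n1).getD 0 : Nat)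
    let b : Int := ((PySem.List.index? keys n2).getD 0 : Nat)
    let c : Int := ((PySem.List.index? keys n3).getD 0 : Nat)
    10000 * a + 100 * b + c
  | _ => 0  -- fewer than three attending entries: Python raises ValueError (outside Pre_)

-- ===== PORT B =====
-- the three-smallest state: (m1, m2, m3), each None or (rank, position)
def bstep (s : Option (Int × Int) × Option (Int × Int) × Option (Int × Int))
    (p : Int × (Int × Bool)) :
    Option (Int × Int) × Option (Int × Int) × Option (Int × Int) :=
  if p.2.2 then
    let r := p.2.1
    let i := p.1
    match s with
    | (m1, m2, m3) =>
      match m1 with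
      | none => (some (r, i), m1, m2)
      | some v1 =>
        if r < v1.1 then (some (r, i), m1, m2)
        else
          match m2 with
          | none => (m1, some (r, i), m2)
          | some v2 =>
            if r < v2.1 then (m1, some (r, i), m2)
            else
              match m3 with
              | none => (m1, m2, some (r, i))
              | some v3 => if r < v3.1 then (m1, m2, some (r, i)) else (m1, m2, m3)
  else s

def solution_alt (rank : List Int) (attendance : List Bool) : Int :=
  let d := (rank.zip attendance).foldl (fun d p => d.insert p.1 p.2) PySem.Dict.empty
  match (PySem.List.enumerate d.items 0).foldl bstep (none, none, none) with
  | (some v1, some v2, some v3) => 10000 * v1.2 + 100 * v2.2 + v3.2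
  | _ => 0  -- fewer than three attending entries: Python raises TypeError (outside Pre_)

-- ===== PRECONDITION & SPEC =====
-- Pre_ excludes exactly the inputs on which A raises (ValueError unpacking fewer than
-- three attending deduplicated entries); B also raises there (TypeError).
def Pre_solution (rank : List Int) (attendance : List Bool) : Prop :=
  3 ≤ ((PySem.List.dedup ((rank.zip attendance).map Prod.fst)).filter
        (fun r => ((rank.zip attendance).reverse.find? (fun p => p.1 == r)).map Prod.snd
                    == some true)).length
instance (rank : List Int) (attendance : List Bool) : Decidable (Pre_solution rank attendance) := by unfold Pre_solution; infer_instance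

def pvWitness_solution : List Int × List Bool := ([3, 7, 2], [true, true, true])

def Spec_solution (rank : List Int) (attendance : List Bool) (out : Int) : Prop := out = solution_alt rank attendance
instance (rank : List Int) (attendance : List Bool) (out : Int) : Decidable (Spec_solution rank attendance out) := by unfold Spec_solution; infer_instance

-- ===== CLAIM (what is proved, stated in full; the proofs are below) =====
def Claim_equal_solution : Prop := ∀ (rank : List Int) (attendance : List Bool), Dom_solution rank attendance → Pre_solution rank attendance → Spec_solution rank attendance (solution rank attendance)

-- ===== LEMMAS AND PROOFS =====

-- comparator of sorted2 on pairs, and of sorted with key fst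
theorem insertBy_congr {α : Type} (b1 b2 : α → α → Bool) (x : α) (l : List α)
    (h : ∀ y ∈ l, b1 x y = b2 x y) :
    PySem.List.insertBy b1 x l = PySem.List.insertBy b2 x l := by
  induction l with
  | nil => rfl
  | cons y ys ih =>
    simp only [PySem.List.insertBy]
    rw [h y (by simp)]
    split
    · rfl
    · rw [ih (fun y hy => h y (by simp [hy]))]

theorem foldl_ins2_eq_ins1 (xs : List (Int × Bool)) (acc : List (Int × Bool))
    (h : ∀ x ∈ xs, ∀ y ∈ acc, x.1 ≠ y.1) (hx : (xs.map Prod.fst).Nodup) :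
    xs.foldl (fun acc x => PySem.List.insertBy
      (fun a b => decide (a.1 < b.1) || (!decide (b.1 < a.1) && decide (a.2 < b.2))) x acc) acc
    = xs.foldl (fun acc x => PySem.List.insertBy (fun a b => decide (a.1 < b.1)) x acc) acc := by
  induction xs generalizing acc with
  | nil => rfl
  | cons x xs ih =>
    simp only [List.foldl_cons]
    rw [insertBy_congr]
    · apply ih
      · intro x' hx' y hy
        rw [PySem.List.mem_insertBy] at hy
        rcases hy with rfl | hy
        · simp only [List.map_cons, List.nodup_cons] at hx
          intro hcontra
          exact hx.1 (hcontra ▸ List.mem_map_of_mem (l := xs) (f := Prod.fst) hx')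
        · exact h x' (List.mem_cons_of_mem _ hx') y hy
      · simpa using hx.sublist (by simp)
    · intro y hy
      have hne : x.1 ≠ y.1 := h x (by simp) y hy
      rcases lt_trichotomy x.1 y.1 with hlt | heq | hgt
      · simp [hlt, not_lt.2 hlt.le]
      · exact absurd heq hne
      · simp [hgt, not_lt.2 hgt.le]

theorem sorted2_eq_sorted_fst (xs : List (Int × Bool)) (hx : (xs.map Prod.fst).Nodup) :
    PySem.List.sorted2 xs Prod.fst Prod.snd = PySem.List.sorted xs Prod.fst := by
  rw [PySem.List.sorted_eq_foldl_insertBy]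
  have h2 : PySem.List.sorted2 xs Prod.fst Prod.snd
      = xs.foldl (fun acc x => PySem.List.insertBy
        (fun a b => decide (a.1 < b.1) || (!decide (b.1 < a.1) && decide (a.2 < b.2))) x acc) [] := by
    simp [PySem.List.sorted2]
  rw [h2]
  exact foldl_ins2_eq_ins1 xs [] (by simp) hx

theorem get?_foldl_insert (z : List (Int × Bool)) (d : PySem.Dict Int Bool) (k : Int) :
    (z.foldl (fun d p => d.insert p.1 p.2) d).get? k
    = ((z.reverse.find? (fun p => p.1 == k)).map Prod.snd).or (d.get? k) := by
  induction z generalizing d with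
  | nil => rfl
  | cons p z ih =>
    simp only [List.foldl_cons, List.reverse_cons, List.find?_append, ih]
    cases h : z.reverse.find? (fun p => p.1 == k) with
    | some q => simp [Option.or]
    | none =>
      simp only [Option.map_none, Option.none_or]
      rw [PySem.Dict.get?_insert]
      by_cases hk : p.1 = k
      · simp [hk, List.find?, Option.or]
      · simp [List.find?, beq_false_of_ne hk, Option.or, Ne.symm hk]


theorem keys_D (z : List (Int × Bool)) :
    (z.foldl (fun d p => d.insert p.1 p.2) (PySem.Dict.empty : PySem.Dict Int Bool)).keys
    = PySem.List.dedup (z.map Prod.fst) := by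
  have h := PySem.Dict.keys_foldl_insert_key z Prod.fst (fun _ p => p.2)
    (PySem.Dict.empty : PySem.Dict Int Bool)
  simpa [PySem.Dict.keys_empty, PySem.List.dedup_eq_ofList, PySem.Set.ofList_eq_foldl,
    PySem.Set.update] using h

theorem nodup_keys_D (z : List (Int × Bool)) :
    (z.foldl (fun d p => d.insert p.1 p.2) (PySem.Dict.empty : PySem.Dict Int Bool)).keys.Nodup := by
  exact PySem.Dict.nodup_keys_foldl_insert_key z Prod.fst (fun _ p => p.2) _
    (by simp [PySem.Dict.keys_empty])

theorem get?_D (z : List (Int × Bool)) (k : Int) :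
    (z.foldl (fun d p => d.insert p.1 p.2) (PySem.Dict.empty : PySem.Dict Int Bool)).get? k
    = (z.reverse.find? (fun p => p.1 == k)).map Prod.snd := by
  rw [get?_foldl_insert]
  simp [PySem.Dict.get?_empty]

theorem filter_items_length (z : List (Int × Bool)) :
    (((z.foldl (fun d p => d.insert p.1 p.2) (PySem.Dict.empty : PySem.Dict Int Bool)).items.filter
        (fun q => q.2 == true)).length)
    = ((PySem.List.dedup (z.map Prod.fst)).filter
        (fun r => ((z.reverse.find? (fun p => p.1 == r)).map Prod.snd) == some true)).length := by
  set D := z.foldl (fun d p => d.insert p.1 p.2) (PySem.Dict.empty : PySem.Dict Int Bool) with hD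
  have hnd : D.keys.Nodup := nodup_keys_D z
  have h1 : D.keys.filter (fun r => D.get? r == some true)
      = (D.items.filter (fun q => D.get? q.1 == some true)).map Prod.fst := by
    show (D.items.map Prod.fst).filter _ = _
    rw [List.filter_map]
    rfl
  have h2 : D.items.filter (fun q => D.get? q.1 == some true)
      = D.items.filter (fun q => q.2 == true) := by
    apply List.filter_congr
    intro q hq
    have : D.get? q.1 = some q.2 := PySem.Dict.get?_of_mem_items D (Prod.mk.eta ▸ hq) hnd
    simp [this]
  have h3 : (fun r => D.get? r == some true)
      = (fun r => ((z.reverse.find? (fun p => p.1 == r)).map Prod.snd) == some true) := by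
    funext r
    rw [get?_D]
  calc (D.items.filter (fun q => q.2 == true)).length
      = ((D.items.filter (fun q => q.2 == true)).map Prod.fst).length := (List.length_map _).symm
    _ = (D.keys.filter (fun r => D.get? r == some true)).length := by rw [h1, h2]
    _ = _ := by rw [h3, keys_D]

-- ---- B-side machinery ----

def toTriple : List (Int × Int) → Option (Int × Int) × Option (Int × Int) × Option (Int × Int)
  | [] => (none, none, none)
  | [a] => (some a, none, none)
  | [a, b] => (some a, some b, none)
  | a :: b :: c :: _ => (some a, some b, some c)

theorem step_correct (l : List (Int × Int)) (i r : Int) (att : Bool) :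
    bstep (toTriple l) (i, (r, att))
    = toTriple (if att then PySem.List.insertBy (fun a b => decide (a.1 < b.1)) (r, i) l else l) := by
  cases att with
  | false => simp [bstep]
  | true =>
    rcases l with _ | ⟨a, _ | ⟨b, _ | ⟨c, t⟩⟩⟩ <;>
      simp only [bstep, toTriple, PySem.List.insertBy, if_true] <;>
      split_ifs <;>
      simp_all <;>
      omega

theorem foldl_bstep (e : List (Int × (Int × Bool))) : ∀ l : List (Int × Int),
    e.foldl bstep (toTriple l)
    = toTriple (e.foldl (fun s p =>
        if p.2.2 then PySem.List.insertBy (fun a b => decide (a.1 < b.1)) (p.2.1, p.1) s else s) l) := by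
  induction e with
  | nil => intro l; rfl
  | cons p e ih =>
    intro l
    obtain ⟨i, r, att⟩ := p
    simp only [List.foldl_cons]
    rw [step_correct]
    exact ih _

theorem bfold_eq_sorted (e : List (Int × (Int × Bool))) :
    e.foldl (fun s p =>
        if p.2.2 then PySem.List.insertBy (fun a b => decide (a.1 < b.1)) (p.2.1, p.1) s else s) []
    = PySem.List.sorted ((e.filter (fun p => p.2.2)).map (fun p => (p.2.1, p.1))) Prod.fst := by
  simp only [PySem.List.foldl_if_eq_foldl_filter]
  rw [PySem.List.sorted_eq_foldl_insertBy]
  rw [List.foldl_map]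

theorem enum_filter_map (xs : List (Int × Bool)) : ∀ s : Int,
    ((((PySem.List.enumerate xs s).filter (fun p => p.2.2)).map (fun p => (p.2.1, p.1))).map Prod.fst)
    = (xs.filter (fun q => q.2)).map Prod.fst := by
  induction xs with
  | nil => intro s; rfl
  | cons x t ih =>
    intro s
    rw [show PySem.List.enumerate (x :: t) s = (s, x) :: PySem.List.enumerate t (s + 1) from rfl]
    cases hx : x.2 with
    | false => simpa [List.filter_cons, hx] using ih (s + 1)
    | true => simpa [List.filter_cons, hx] using ih (s + 1)

theorem mem_enum_pos (xs : List (Int × Bool)) (c : Int × (Int × Bool))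
    (hc : c ∈ PySem.List.enumerate xs 0) :
    ∃ (j : Nat) (hj : j < xs.length), c.1 = (j : Int) ∧ c.2 = xs[j] := by
  rw [PySem.List.enumerate_eq_zipIdx_map] at hc
  obtain ⟨p, hp, rfl⟩ := List.mem_map.mp hc
  obtain ⟨a, j⟩ := p
  have h := List.mem_zipIdx (k := 0) hp
  exact ⟨j, by omega, by simp, by simpa using h.2.2⟩

theorem index?_getElem_nodup (l : List Int) (h : l.Nodup) (j : Nat) (hj : j < l.length) :
    PySem.List.index? l l[j] = some j := by
  rw [PySem.List.index?_eq_some_iff]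
  refine ⟨l.take j, l.drop (j + 1), ?_, ?_, ?_⟩
  · conv_lhs => rw [← List.take_append_drop j l]
    rw [List.drop_eq_getElem_cons hj]
  · simp [List.length_take]; omega
  · intro hmem
    obtain ⟨k, hk, hkeq⟩ := List.getElem_of_mem hmem
    rw [List.getElem_take] at hkeq
    have hkj : k < j ∧ k < l.length := by simpa [List.length_take] using hk
    have := (h.getElem_inj_iff).mp hkeq
    omega

-- ---- A-side sort machinery ----

theorem pairwise_lt_sorted (xs : List (Int × Bool)) (h : (xs.map Prod.fst).Nodup) :
    (PySem.List.sorted xs Prod.fst).Pairwise (fun a b => a.1 < b.1) := by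
  have hle := PySem.List.sorted_pairwise xs Prod.fst
  have hperm : ((PySem.List.sorted xs Prod.fst false).map Prod.fst).Perm (xs.map Prod.fst) :=
    (PySem.List.sorted_perm xs Prod.fst false).map Prod.fst
  have hnd : ((PySem.List.sorted xs Prod.fst false).map Prod.fst).Nodup :=
    (hperm.nodup_iff).mpr h
  have hne : (PySem.List.sorted xs Prod.fst false).Pairwise (fun a b => a.1 ≠ b.1) :=
    List.pairwise_map.mp hnd
  exact (hle.and hne).imp (fun hab => lt_of_le_of_ne hab.1 hab.2)

theorem sort_filter_comm (xs : List (Int × Bool)) (h : (xs.map Prod.fst).Nodup) :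
    PySem.List.sorted (xs.filter (fun q => q.2)) Prod.fst
    = (PySem.List.sorted xs Prod.fst).filter (fun q => q.2) :=
  PySem.List.sorted_eq_of_perm_of_pairwise_lt _ _ Prod.fst
    ((PySem.List.sorted_perm xs Prod.fst false).filter _)
    ((pairwise_lt_sorted xs h).filter _)

theorem key_lists_eq (F : List (Int × Bool)) (cands : List (Int × Int))
    (hm : cands.map Prod.fst = F.map Prod.fst) :
    (PySem.List.sorted F Prod.fst).map Prod.fst
    = (PySem.List.sorted cands Prod.fst).map Prod.fst := by
  have h1 : PySem.List.sorted (F.map Prod.fst) (fun x => x)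
      = (PySem.List.sorted F Prod.fst).map Prod.fst :=
    PySem.List.sorted_id_eq_of_perm_of_pairwise _ _
      ((PySem.List.sorted_perm F Prod.fst false).map Prod.fst)
      (PySem.List.sorted_map_key_pairwise F Prod.fst)
  have h2 : PySem.List.sorted (F.map Prod.fst) (fun x => x)
      = (PySem.List.sorted cands Prod.fst).map Prod.fst :=
    PySem.List.sorted_id_eq_of_perm_of_pairwise _ _
      (hm ▸ (PySem.List.sorted_perm cands Prod.fst false).map Prod.fst)
      (PySem.List.sorted_map_key_pairwise cands Prod.fst)
  rw [← h1, h2]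

-- ===== VERDICT (by name: the statement is the Claim_ definition above) =====
theorem solution_spec : Claim_equal_solution := by
  intro rank attendance _ hpre
  unfold Pre_solution at hpre
  unfold Spec_solution solution solution_alt
  dsimp only []
  set z := rank.zip attendance with hz
  set D := z.foldl (fun d p => d.insert p.1 p.2) (PySem.Dict.empty : PySem.Dict Int Bool) with hD
  rw [← filter_items_length z] at hpre
  set e := PySem.List.enumerate D.items 0 with he
  set cands := (e.filter (fun p => p.2.2)).map (fun p => (p.2.1, p.1)) with hcands
  set S2 := PySem.List.sorted cands Prod.fst with hS2def
  have hfilter_eq : D.items.filter (fun q => q.2 == true) = D.items.filter (fun q => q.2) := by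
    simp
  set F := D.items.filter (fun q => q.2) with hF
  have hlenF : 3 ≤ F.length := by rw [hfilter_eq] at hpre; exact hpre
  have hcands_map : cands.map Prod.fst = F.map Prod.fst := enum_filter_map D.items 0
  have hlenS2 : 3 ≤ S2.length := by
    have hlc := congrArg List.length hcands_map
    simp only [List.length_map] at hlc
    rw [hS2def, PySem.List.length_sorted, hlc]
    exact hlenF
  have hnodupkeys : D.keys.Nodup := nodup_keys_D z
  have hnodup : (D.items.map Prod.fst).Nodup := hnodupkeys
  have hsorted2 : PySem.List.sorted2 D.items Prod.fst Prod.snd = PySem.List.sorted D.items Prod.fst :=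
    sorted2_eq_sorted_fst _ hnodup
  have hcomm : (PySem.List.sorted D.items Prod.fst).filter (fun q => q.2)
      = PySem.List.sorted F Prod.fst := (sort_filter_comm D.items hnodup).symm
  have hK : (PySem.List.sorted F Prod.fst).map Prod.fst = S2.map Prod.fst :=
    key_lists_eq F cands hcands_map
  obtain ⟨x1, x2, x3, rest, hS2⟩ : ∃ a b c t, S2 = a :: b :: c :: t := by
    rcases hs : S2 with _ | ⟨a, _ | ⟨b, _ | ⟨c, t⟩⟩⟩ <;>
      first
        | exact ⟨a, b, c, t, rfl⟩
        | (exfalso; rw [hs] at hlenS2; simp at hlenS2)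
  have hB : e.foldl bstep (none, none, none) = (some x1, some x2, some x3) := by
    rw [show ((none, none, none) :
          Option (Int × Int) × Option (Int × Int) × Option (Int × Int)) = toTriple [] from rfl,
        foldl_bstep, bfold_eq_sorted, ← hcands, ← hS2def, hS2]
    rfl
  have hidx : ∀ x ∈ S2, ∃ j : Nat, x.2 = (j : Int) ∧ PySem.List.index? D.keys x.1 = some j := by
    intro x hx
    have hxc : x ∈ cands := (PySem.List.mem_sorted cands Prod.fst false x).mp hx
    obtain ⟨p, hp, rfl⟩ := List.mem_map.mp hxc
    have hpe : p ∈ e := (List.mem_filter.mp hp).1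
    obtain ⟨j, hj, hj1, hj2⟩ := mem_enum_pos D.items p (he ▸ hpe)
    refine ⟨j, by simpa using hj1, ?_⟩
    have hkeys : D.keys = D.items.map Prod.fst := rfl
    have hjk : j < D.keys.length := by rw [hkeys]; simpa using hj
    have hgk : D.keys[j]'hjk = p.2.1 := by
      rw [List.getElem_of_eq hkeys, List.getElem_map, ← hj2]
    rw [← hgk]
    exact index?_getElem_nodup _ hnodupkeys j hjk
  obtain ⟨j1, hx1v, hx1i⟩ := hidx x1 (by rw [hS2]; exact List.mem_cons_self)
  obtain ⟨j2, hx2v, hx2i⟩ := hidx x2 (by rw [hS2]; exact List.mem_cons_of_mem _ List.mem_cons_self)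
  obtain ⟨j3, hx3v, hx3i⟩ := hidx x3
    (by rw [hS2]; exact List.mem_cons_of_mem _ (List.mem_cons_of_mem _ List.mem_cons_self))
  have hpicked : (((PySem.List.sorted2 D.items Prod.fst Prod.snd).filter
        (fun i => i.2 == true)).map (fun i => i.1)).take 3 = [x1.1, x2.1, x3.1] := by
    rw [hsorted2]
    rw [show (fun i : Int × Bool => i.2 == true) = (fun q : Int × Bool => (q.2 : Bool)) from by
      funext q; simp]
    rw [hcomm]
    rw [show ((PySem.List.sorted F Prod.fst).map (fun i => i.1))
        = (PySem.List.sorted F Prod.fst).map Prod.fst from rfl]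
    rw [hK, hS2]
    rfl
  rw [hB, hpicked]
  dsimp only
  rw [hx1i, hx2i, hx3i]
  simp only [Option.getD_some]
  rw [hx1v, hx2v, hx3v]
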